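-- pv_equiv track=rewrite | github.com/elbachir67/Neural-Embeddings-and-Auto-Regression | paper_code_1/token_pair_adapter.py | _extract_element_text
-- ===== SOURCE A (Python) =====
-- def _extract_element_text(model_text, element_id, element_type):
--     """
--     Extract text representation of a specific model element from the full model text
--     This is a simplified implementation - in practice, you'd need more sophisticated parsing
--
--     Args:
--         model_text: Full text representation of the model
--         element_id: ID of the element to extract
--         element_type: Type of the element to extract
--
--     Returns:
--         Text representation of the element or None if not found
--     """
--     lines = model_text.split('\n')
--     element_lines = []
--     capturing = False
--     element_identifier = f"{element_type}:"
--
--     for line in lines: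
--         if element_identifier in line and not capturing:
--             capturing = True
--             element_lines.append(line)
--         elif capturing and line.strip() and not line.startswith(' '):
--             # Stop capturing when we hit the next non-indented line
--             break
--         elif capturing:
--             element_lines.append(line)
--
--     return '\n'.join(element_lines) if element_lines else None
-- ===== SOURCE B (Python) =====
-- def _extract_element_text(model_text, element_id, element_type):
--     """Locate-then-gather: find the first line containing f"{element_type}:",
--     then collect the contiguous indented/blank block that follows it."""
--     lines = model_text.split('\n')
--     identifier = element_type + ":"
--     # phase 1: drop lines until one contains the identifier
--     while lines and identifier not in lines[0]:
--         lines = lines[1:]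
--     if not lines:
--         return None
--     # phase 2: gather the block starting at the matching line
--     block = [lines[0]]
--     for line in lines[1:]:
--         if line.strip() and not line.startswith(' '):
--             break
--         block.append(line)
--     return '\n'.join(block)
-- ===== Notes on version B (the rewrite author's own statement) =====
-- stated objective: simpler
-- what changed: Replaced the single flag-driven state machine (capturing boolean threaded through one loop with a break) by a two-phase locate-then-gather decomposition: first drop lines until one contains the identifier, then gather the contiguous indented/blank block after it.
import Mathlib
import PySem

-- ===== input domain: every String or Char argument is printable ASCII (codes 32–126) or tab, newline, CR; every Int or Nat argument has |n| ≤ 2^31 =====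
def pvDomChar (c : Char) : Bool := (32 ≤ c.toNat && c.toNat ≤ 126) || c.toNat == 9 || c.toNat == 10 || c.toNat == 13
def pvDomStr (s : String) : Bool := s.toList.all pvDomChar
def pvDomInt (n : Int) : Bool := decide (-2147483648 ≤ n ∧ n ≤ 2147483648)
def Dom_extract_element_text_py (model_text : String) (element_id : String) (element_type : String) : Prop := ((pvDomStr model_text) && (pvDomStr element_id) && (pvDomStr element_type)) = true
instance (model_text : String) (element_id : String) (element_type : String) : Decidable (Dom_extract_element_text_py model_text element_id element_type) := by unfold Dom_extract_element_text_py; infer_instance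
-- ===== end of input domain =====

-- shared primitive: s.split('\n') (sep literal and nonempty, so split? is always some)
def pvSplitNL (s : String) : List String := (PySem.Str.split? s "\n").getD []

-- B replaces A's flag-driven single loop by a locate-then-gather two-phase decomposition (objective: simpler).

-- ===== PORT A =====
-- the for-loop over lines with state (element_lines, capturing); returning the acc models `break`
def pvALoop (ident : String) (lines : List String) (acc : List String) (capturing : Bool) : List String :=
  match lines with
  | [] => acc
  | line :: rest =>
    if PySem.Str.isIn ident line && !capturing then
      pvALoop ident rest (acc ++ [line]) true
    else if capturing && decide (PySem.Str.strip line ≠ "") && !(PySem.Str.startswith line " ") then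
      acc
    else if capturing then
      pvALoop ident rest (acc ++ [line]) capturing
    else
      pvALoop ident rest acc capturing

def extract_element_text_py (model_text : String) (element_id : String) (element_type : String) : Option String :=
  let lines := pvSplitNL model_text
  let element_identifier := element_type ++ ":"
  let element_lines := pvALoop element_identifier lines [] false
  if element_lines ≠ [] then some (PySem.Str.join "\n" element_lines) else none

-- ===== PORT B =====
-- phase 1: the while-loop dropping lines until lines[0] contains the identifier
def pvLocate (ident : String) (lines : List String) : List String :=
  match lines with
  | [] => []
  | line :: rest => if !(PySem.Str.isIn ident line) then pvLocate ident rest else line :: rest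

-- phase 2: the for-loop gathering the block after the matching line (break modelled by returning)
def pvGather (lines : List String) : List String :=
  match lines with
  | [] => []
  | line :: rest =>
    if decide (PySem.Str.strip line ≠ "") && !(PySem.Str.startswith line " ") then []
    else line :: pvGather rest

def extract_element_text_py_alt (model_text : String) (element_id : String) (element_type : String) : Option String :=
  let lines := pvSplitNL model_text
  let identifier := element_type ++ ":"
  match pvLocate identifier lines with
  | [] => none
  | first :: rest => some (PySem.Str.join "\n" (first :: pvGather rest))

-- ===== PRECONDITION & SPEC =====
def Spec_extract_element_text_py (model_text : String) (element_id : String) (element_type : String) (out : Option String) : Prop := out = extract_element_text_py_alt model_text element_id element_type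
instance (model_text : String) (element_id : String) (element_type : String) (out : Option String) : Decidable (Spec_extract_element_text_py model_text element_id element_type out) := by unfold Spec_extract_element_text_py; infer_instance

-- ===== CLAIM (what is proved, stated in full; the proofs are below) =====
def Claim_equal_extract_element_text_py : Prop := ∀ (model_text : String) (element_id : String) (element_type : String), Dom_extract_element_text_py model_text element_id element_type → Spec_extract_element_text_py model_text element_id element_type (extract_element_text_py model_text element_id element_type)

-- ===== LEMMAS AND PROOFS =====
-- capture phase: A's loop with capturing = true appends exactly B's gathered block
theorem pvALoop_capturing (ident : String) (lines acc : List String) :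
    pvALoop ident lines acc true = acc ++ pvGather lines := by
  induction lines generalizing acc with
  | nil => simp [pvALoop, pvGather]
  | cons line rest ih =>
    by_cases h : ¬PySem.Str.strip line = "" ∧ PySem.Chars.startswith line.toList [' '] = false
    · simp [pvALoop, pvGather, h]
    · simp [pvALoop, pvGather, h, ih]

-- locate phase: A's loop with capturing = false behaves as locate followed by the capture phase
theorem pvALoop_searching (ident : String) (lines : List String) :
    pvALoop ident lines [] false =
      match pvLocate ident lines with
      | [] => []
      | first :: rest => first :: pvGather rest := by
  induction lines with
  | nil => simp [pvALoop, pvLocate]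
  | cons line rest ih =>
    by_cases h : PySem.Chars.isIn ident.toList line.toList = true
    · simp [pvALoop, pvLocate, h, pvALoop_capturing]
    · simp [pvALoop, pvLocate, h, ih]

-- ===== VERDICT (by name: the statement is the Claim_ definition above) =====
theorem extract_element_text_py_spec : Claim_equal_extract_element_text_py := by
  intro model_text element_id element_type _
  unfold Spec_extract_element_text_py extract_element_text_py extract_element_text_py_alt
  simp only [pvALoop_searching]
  cases h : pvLocate (element_type ++ ":") (pvSplitNL model_text) with
  | nil => simp [h]
  | cons first rest => simp [h]
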